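-- pv_equiv track=rewrite | github.com/TamarawGuy/SoftUni-Education | Python/03.Python_Advanced/03. Multidimensional Lists/Exercise/5.snake_moves.py | fill_up_matrix
-- ===== SOURCE A (Python) =====
-- def fill_up_matrix(matrix, word):
--     word_index = 0
--     rows = len(matrix)
--     cols = len(matrix[0])
--
--     for r in range(rows):
--         for c in range(cols):
--             matrix[r][c] = word[word_index]
--             word_index += 1
--             if word_index == len(word):
--                 word_index = 0
--
--     return matrix
-- ===== SOURCE B (Python) =====
-- def fill_up_matrix(matrix, word):
--     rows, cols = len(matrix), len(matrix[0])
--     total = rows * cols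
--     flat = word * (total // max(len(word), 1) + 1)
--     for r in range(rows):
--         matrix[r][:cols] = flat[r * cols:(r + 1) * cols]
--     return matrix
-- ===== Notes on version B (the rewrite author's own statement) =====
-- stated objective: alternative
-- what changed: B materializes the whole cyclic fill once as a repeated string and writes each row in one slice assignment from the corresponding chunk, eliminating A's per-cell inner loop and stepped-and-reset counter.
import Mathlib
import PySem

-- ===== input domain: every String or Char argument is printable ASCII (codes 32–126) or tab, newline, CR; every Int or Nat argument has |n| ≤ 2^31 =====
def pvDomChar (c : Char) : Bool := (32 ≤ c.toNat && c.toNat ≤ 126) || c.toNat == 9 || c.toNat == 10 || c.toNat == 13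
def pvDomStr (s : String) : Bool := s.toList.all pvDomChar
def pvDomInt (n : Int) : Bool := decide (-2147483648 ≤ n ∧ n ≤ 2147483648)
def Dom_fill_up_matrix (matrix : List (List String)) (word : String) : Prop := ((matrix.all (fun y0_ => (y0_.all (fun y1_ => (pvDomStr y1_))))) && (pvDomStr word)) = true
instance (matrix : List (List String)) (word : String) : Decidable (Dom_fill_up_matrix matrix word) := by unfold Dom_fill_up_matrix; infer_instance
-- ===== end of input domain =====

-- B builds the whole cyclic fill once as a repeated string and writes each row by one slice
-- assignment from its chunk (no per-cell counter). Both Pythons mutate `matrix` in place and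
-- return it; the equivalence proved here is about the RETURN value.

-- ===== PORT A =====
-- the body of A's inner loop: matrix[r][c] = word[word_index]; word_index += 1; reset at len(word)
def pvInnerA (word : String) (r : Nat) (st : List (List String) × Int) (c : Nat) : List (List String) × Int :=
  let v := String.mk [(PySem.Str.pyGet? word st.2).getD ' ']
  let mat := st.1.set r ((st.1.getD r []).set c v)
  let wi := st.2 + 1
  (mat, if wi = PySem.Str.len word then 0 else wi)

def fill_up_matrix (matrix : List (List String)) (word : String) : List (List String) :=
  let rows := matrix.length
  let cols := (matrix.headD []).length
  ((List.range rows).foldl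
      (fun st r => (List.range cols).foldl (pvInnerA word r) st)
      (matrix, 0)).1

-- ===== PORT B =====
def fill_up_matrix_alt (matrix : List (List String)) (word : String) : List (List String) :=
  let rows := matrix.length
  let cols := (matrix.headD []).length
  let total := rows * cols
  -- flat = word * (total // max(len(word), 1) + 1): all operands are nonnegative,
  -- so Nat '*' '/' 'max' are exact here; string repetition = flatten of replicate
  let flat := (List.replicate (total / max word.toList.length 1 + 1) word.toList).flatten
  (List.range rows).foldl
    (fun mat r =>
      -- matrix[r][:cols] = flat[r*cols:(r+1)*cols] : slice assignment, ported by hand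
      -- (exact: replaces the first cols elements of the row by the chunk's characters)
      mat.set r
        ((PySem.List.slice flat (some ((r * cols : Nat) : Int)) (some (((r + 1) * cols : Nat) : Int))).map
            (fun ch => String.mk [ch])
          ++ (mat.getD r []).drop cols))
    matrix

-- ===== PRECONDITION & SPEC =====
-- Pre_ excludes exactly the inputs where A raises IndexError: an empty matrix (matrix[0]),
-- a row shorter than the first row (assignment out of range), and an empty word when there
-- is at least one cell to fill (word[0]).
def Pre_fill_up_matrix (matrix : List (List String)) (word : String) : Prop :=
  matrix ≠ [] ∧ (∀ row ∈ matrix, (matrix.headD []).length ≤ row.length) ∧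
    ((matrix.headD []).length = 0 ∨ word.toList ≠ [])
instance (matrix : List (List String)) (word : String) : Decidable (Pre_fill_up_matrix matrix word) := by
  unfold Pre_fill_up_matrix; infer_instance

def pvWitness_fill_up_matrix : List (List String) × String := ([["x", "y"], ["z", "w"]], "abc")

def Spec_fill_up_matrix (matrix : List (List String)) (word : String) (out : List (List String)) : Prop := out = fill_up_matrix_alt matrix word
instance (matrix : List (List String)) (word : String) (out : List (List String)) : Decidable (Spec_fill_up_matrix matrix word out) := by unfold Spec_fill_up_matrix; infer_instance

-- ===== CLAIM (what is proved, stated in full; the proofs are below) =====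
def Claim_equal_fill_up_matrix : Prop := ∀ (matrix : List (List String)) (word : String), Dom_fill_up_matrix matrix word → Pre_fill_up_matrix matrix word → Spec_fill_up_matrix matrix word (fill_up_matrix matrix word)

-- ===== LEMMAS AND PROOFS =====

-- the string written into cell with cyclic index k
def pvCell (w : List Char) (k : Nat) : String := String.mk [w.getD k ' ']

-- what one fully processed row looks like
def pvRowOut (w : List Char) (cols r : Nat) (row : List String) : List String :=
  (List.range cols).map (fun c => pvCell w ((r * cols + c) % w.length)) ++ row.drop cols

lemma pv_succ_mod (a L : Nat) (hL : 0 < L) :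
    (a + 1) % L = if a % L + 1 = L then 0 else a % L + 1 := by
  have hrw : (a + 1) % L = (a % L + 1) % L := by
    conv_lhs => rw [← Nat.div_add_mod a L]
    rw [Nat.add_assoc, Nat.mul_add_mod]
  have hlt := Nat.mod_lt a hL
  split_ifs with h
  · rw [hrw, h, Nat.mod_self]
  · rw [hrw, Nat.mod_eq_of_lt (by omega)]

lemma pv_set_append_cons {α : Type} (l1 l2 : List α) (x v : α) :
    (l1 ++ x :: l2).set l1.length v = l1 ++ v :: l2 := by
  induction l1 with
  | nil => simp
  | cons a l ih => simp [ih]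

-- inner loop of A: starting at row r (present in mat) with cyclic index k, n steps fill the
-- first n cells of that row and advance the index by n (mod len(word))
lemma pv_inner_spec (word : String) (hL : word.toList.length ≠ 0)
    (r : Nat) (mat : List (List String)) (row : List String) (hr : mat[r]? = some row) :
    ∀ (n : Nat) (k : Nat), n ≤ row.length →
    (List.range n).foldl (pvInnerA word r) (mat, (((k % word.toList.length : Nat)) : Int)) =
      (mat.set r ((List.range n).map (fun c => pvCell word.toList ((k + c) % word.toList.length))
          ++ row.drop n),
       (((k + n) % word.toList.length : Nat) : Int)) := by
  have hrlen : r < mat.length := by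
    by_contra h
    rw [List.getElem?_eq_none (by omega)] at hr
    simp at hr
  intro n
  induction n with
  | zero =>
    intro k _
    simp only [List.range_zero, List.foldl_nil, List.map_nil, List.nil_append, List.drop_zero,
      Nat.add_zero]
    congr 1
    have : row = mat[r] := by
      have := List.getElem?_eq_getElem hrlen
      rw [hr] at this; exact (Option.some.injEq _ _).mp this
    rw [this, List.set_getElem_self]
  | succ n ih =>
    intro k hn
    have hn' : n < row.length := by omega
    rw [List.range_succ, List.foldl_append, ih k (by omega), List.foldl_cons, List.foldl_nil]
    set L := word.toList.length with hLdef
    have hmodlt : (k + n) % L < L := Nat.mod_lt _ (by omega)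
    unfold pvInnerA
    simp only []
    have hget : PySem.Str.pyGet? word (((k + n) % L : Nat) : Int)
        = some (word.toList.getD ((k + n) % L) ' ') := by
      rw [PySem.Str.pyGet?_natCast, List.getElem?_eq_getElem hmodlt, List.getD_eq_getElem _ _ hmodlt]
    refine Prod.ext ?_ ?_
    · -- matrix component
      simp only [hget, Option.getD_some]
      have hgetD : (mat.set r ((List.range n).map
            (fun c => pvCell word.toList ((k + c) % L)) ++ row.drop n)).getD r []
          = (List.range n).map (fun c => pvCell word.toList ((k + c) % L)) ++ row.drop n := by
        rw [List.getD_eq_getElem?_getD, List.getElem?_set_self (by simpa using hrlen)]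
        rfl
      rw [hgetD, List.set_set]
      congr 1
      rw [List.drop_eq_getElem_cons hn']
      have hlen : ((List.range n).map (fun c => pvCell word.toList ((k + c) % L))).length = n := by
        simp
      calc ((List.range n).map (fun c => pvCell word.toList ((k + c) % L))
              ++ (row[n] : String) :: row.drop (n + 1)).set n (String.mk [word.toList.getD ((k + n) % L) ' '])
          = ((List.range n).map (fun c => pvCell word.toList ((k + c) % L))
              ++ (row[n] : String) :: row.drop (n + 1)).set
              ((List.range n).map (fun c => pvCell word.toList ((k + c) % L))).length
              (String.mk [word.toList.getD ((k + n) % L) ' ']) := by rw [hlen]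
        _ = (List.range n).map (fun c => pvCell word.toList ((k + c) % L))
              ++ String.mk [word.toList.getD ((k + n) % L) ' '] :: row.drop (n + 1) := by
              rw [pv_set_append_cons]
        _ = (List.range n ++ [n]).map (fun c => pvCell word.toList ((k + c) % L))
              ++ row.drop (n + 1) := by
              rw [List.map_append, List.map_singleton, List.append_assoc]
              rfl
    · -- word-index component
      simp only [PySem.Str.len_eq, ← hLdef]
      have hsucc := pv_succ_mod (k + n) L (by omega)
      by_cases hres : (k + n) % L + 1 = L
      · rw [if_pos (by omega : (((k + n) % L : Nat) : Int) + 1 = (L : Int))]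
        have : (k + (n + 1)) % L = 0 := by rw [← Nat.add_assoc, hsucc, if_pos hres]
        rw [this]; rfl
      · rw [if_neg (by omega : ¬ ((((k + n) % L : Nat) : Int) + 1 = (L : Int)))]
        have : (k + (n + 1)) % L = (k + n) % L + 1 := by rw [← Nat.add_assoc, hsucc, if_neg hres]
        rw [this]; push_cast; ring

-- outer loop of A: after processing the first n rows, those rows are filled, counter = n*cols
lemma pv_outer_spec (word : String) (hL : word.toList.length ≠ 0)
    (cols : Nat) (matrix : List (List String))
    (hrows : ∀ row ∈ matrix, cols ≤ row.length) :
    ∀ n, n ≤ matrix.length →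
    (List.range n).foldl (fun st r => (List.range cols).foldl (pvInnerA word r) st) (matrix, 0) =
      ((matrix.take n).mapIdx (fun r row => pvRowOut word.toList cols r row) ++ matrix.drop n,
       (((n * cols) % word.toList.length : Nat) : Int)) := by
  intro n
  induction n with
  | zero => simp
  | succ n ih =>
    intro hn
    have hn' : n < matrix.length := by omega
    rw [List.range_succ, List.foldl_append, ih (by omega), List.foldl_cons, List.foldl_nil]
    set L := word.toList.length with hLdef
    set pref := (matrix.take n).mapIdx (fun r row => pvRowOut word.toList cols r row) with hpref
    have hpreflen : pref.length = n := by
      rw [hpref, List.length_mapIdx, List.length_take]; omega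
    have hdrop : matrix.drop n = matrix[n] :: matrix.drop (n + 1) := List.drop_eq_getElem_cons hn'
    have hr : (pref ++ matrix.drop n)[n]? = some matrix[n] := by
      rw [List.getElem?_append_right (by omega), hpreflen, Nat.sub_self, List.getElem?_drop,
        Nat.add_zero, List.getElem?_eq_getElem hn']
    have hcols : cols ≤ (matrix[n]).length := hrows _ (List.getElem_mem hn')
    have hinner := pv_inner_spec word hL n (pref ++ matrix.drop n) matrix[n] hr cols (n * cols) hcols
    rw [hinner]
    refine Prod.ext ?_ ?_
    · simp only []
      have hset := pv_set_append_cons pref (matrix.drop (n + 1)) (matrix[n])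
        ((List.range cols).map (fun c => pvCell word.toList ((n * cols + c) % L))
          ++ (matrix[n]).drop cols)
      rw [hpreflen] at hset
      rw [hdrop, hset]
      have htakelen : (matrix.take n).length = n := by rw [List.length_take]; omega
      have htake : matrix.take (n + 1) = matrix.take n ++ [matrix[n]] := by
        rw [List.take_add_one, List.getElem?_eq_getElem hn']; rfl
      rw [htake, List.mapIdx_concat, htakelen, ← hpref]
      simp only [pvRowOut, ← hLdef, List.append_assoc, List.singleton_append]
    · simp only []
      have : n * cols + cols = (n + 1) * cols := by ring
      rw [this]

-- characterization of port A under Pre_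
lemma pvA_char (matrix : List (List String)) (word : String)
    (hrows : ∀ row ∈ matrix, (matrix.headD []).length ≤ row.length)
    (hL : word.toList.length ≠ 0) :
    fill_up_matrix matrix word
      = matrix.mapIdx (fun r row => pvRowOut word.toList (matrix.headD []).length r row) := by
  rw [show fill_up_matrix matrix word
      = ((List.range matrix.length).foldl
          (fun st r => (List.range (matrix.headD []).length).foldl (pvInnerA word r) st)
          (matrix, 0)).1 from rfl]
  rw [pv_outer_spec word hL _ matrix hrows matrix.length (le_refl _)]
  simp

-- the trivial A path: a matrix with zero columns is returned unchanged
lemma pvA_cols_zero (matrix : List (List String)) (word : String)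
    (h : (matrix.headD []).length = 0) :
    fill_up_matrix matrix word = matrix := by
  rw [show fill_up_matrix matrix word
      = ((List.range matrix.length).foldl
          (fun st r => (List.range (matrix.headD []).length).foldl (pvInnerA word r) st)
          (matrix, 0)).1 from rfl]
  rw [h]
  simp [List.foldl_fixed]

-- B's flat repeated string, indexed inside the repetitions, reads the word cyclically
lemma pv_flat_getElem (w : List Char) (hL : w.length ≠ 0) :
    ∀ (reps i : Nat), i < reps * w.length →
      ((List.replicate reps w).flatten)[i]? = w[i % w.length]? := by
  intro reps
  induction reps with
  | zero => intro i h; omega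
  | succ n ih =>
    intro i h
    rw [List.replicate_succ, List.flatten_cons]
    by_cases hi : i < w.length
    · rw [List.getElem?_append_left hi, Nat.mod_eq_of_lt hi]
    · push_neg at hi
      rw [List.getElem?_append_right hi, Nat.mod_eq_sub_mod hi]
      have hmul : (n + 1) * w.length = n * w.length + w.length := by ring
      exact ih (i - w.length) (by omega)

-- B's per-row chunk, mapped to one-char strings, is A's per-row cyclic map
lemma pv_chunk_eq (w : List Char) (hL : w.length ≠ 0) (rows cols r : Nat) (hr : r < rows) :
    ((PySem.List.slice ((List.replicate (rows * cols / max w.length 1 + 1) w).flatten)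
        (some ((r * cols : Nat) : Int)) (some (((r + 1) * cols : Nat) : Int))).map
        (fun ch => String.mk [ch]))
      = (List.range cols).map (fun c => pvCell w ((r * cols + c) % w.length)) := by
  set L := w.length with hLdef
  set reps := rows * cols / max L 1 + 1 with hreps
  have hmax : max L 1 = L := by omega
  have htot : rows * cols < reps * L := by
    have := Nat.div_add_mod (rows * cols) L
    have := Nat.mod_lt (rows * cols) (show 0 < L by omega)
    rw [hreps, hmax]; nlinarith [Nat.div_add_mod (rows * cols) L]
  have hflatlen : ((List.replicate reps w).flatten).length = reps * L := by
    rw [hLdef]; simp [List.length_flatten, Nat.mul_comm]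
  have hsum : (r + 1) * cols = r * cols + cols := by ring
  have hbound : r * cols + cols ≤ rows * cols := by
    have h1 : (r + 1) * cols ≤ rows * cols := mul_le_mul_right' (by omega) cols
    omega
  rw [PySem.List.slice_natCast]
  have hsub : (r + 1) * cols - r * cols = cols := by omega
  rw [hsub]
  have hlen1 : ((((List.replicate reps w).flatten).drop (r * cols)).take cols).length = cols := by
    rw [List.length_take, List.length_drop, hflatlen]; omega
  apply List.ext_getElem
  · simp only [List.length_map, List.length_range, hlen1]
  · intro c h1 h2
    have hc : c < cols := by
      rw [List.length_map, hlen1] at h1; exact h1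
    rw [List.getElem_map, List.getElem_take, List.getElem_drop]
    rw [List.getElem_map, List.getElem_range]
    have hidx : r * cols + c < reps * L := by omega
    have hflat := pv_flat_getElem w hL reps (r * cols + c) hidx
    have hmod : (r * cols + c) % L < L := Nat.mod_lt _ (by omega)
    unfold pvCell
    congr 1
    have h1' : ((List.replicate reps w).flatten)[r * cols + c]'(by omega)
        = w[(r * cols + c) % L]'(hmod) := by
      have := hflat
      rw [List.getElem?_eq_getElem (by omega : r * cols + c < ((List.replicate reps w).flatten).length),
        List.getElem?_eq_getElem hmod] at this
      exact (Option.some.injEq _ _).mp this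
    rw [h1', List.getD_eq_getElem _ _ hmod]

-- B's outer loop: each row is replaced by its chunk plus its own tail
lemma pvB_outer (word : String) (cols : Nat) (matrix : List (List String))
    (g : Nat → List String)
    (hg : ∀ r, r < matrix.length →
      ((PySem.List.slice ((List.replicate (matrix.length * cols / max word.toList.length 1 + 1)
          word.toList).flatten)
        (some ((r * cols : Nat) : Int)) (some (((r + 1) * cols : Nat) : Int))).map
        (fun ch => String.mk [ch])) = g r) :
    ∀ n, n ≤ matrix.length →
    (List.range n).foldl
      (fun mat r =>
        mat.set r
          ((PySem.List.slice ((List.replicate (matrix.length * cols / max word.toList.length 1 + 1)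
              word.toList).flatten)
            (some ((r * cols : Nat) : Int)) (some (((r + 1) * cols : Nat) : Int))).map
              (fun ch => String.mk [ch])
            ++ (mat.getD r []).drop cols))
      matrix
      = (matrix.take n).mapIdx (fun r row => g r ++ row.drop cols) ++ matrix.drop n := by
  intro n
  induction n with
  | zero => simp
  | succ n ih =>
    intro hn
    have hn' : n < matrix.length := by omega
    rw [List.range_succ, List.foldl_append, ih (by omega), List.foldl_cons, List.foldl_nil]
    set pref := (matrix.take n).mapIdx (fun r row => g r ++ row.drop cols) with hpref
    have hpreflen : pref.length = n := by
      rw [hpref, List.length_mapIdx, List.length_take]; omega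
    have hdrop : matrix.drop n = matrix[n] :: matrix.drop (n + 1) := List.drop_eq_getElem_cons hn'
    have hgetD : (pref ++ matrix.drop n).getD n [] = matrix[n] := by
      rw [List.getD_eq_getElem?_getD, List.getElem?_append_right (by omega), hpreflen,
        Nat.sub_self, List.getElem?_drop, Nat.add_zero, List.getElem?_eq_getElem hn']
      rfl
    rw [hgetD, hg n hn']
    have hset := pv_set_append_cons pref (matrix.drop (n + 1)) (matrix[n])
      (g n ++ (matrix[n]).drop cols)
    rw [hpreflen] at hset
    rw [hdrop, hset]
    have htakelen : (matrix.take n).length = n := by rw [List.length_take]; omega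
    have htake : matrix.take (n + 1) = matrix.take n ++ [matrix[n]] := by
      rw [List.take_add_one, List.getElem?_eq_getElem hn']; rfl
    rw [htake, List.mapIdx_concat, htakelen, ← hpref]
    simp

-- characterization of port B when the word is nonempty
lemma pvB_char (matrix : List (List String)) (word : String) (hL : word.toList.length ≠ 0) :
    fill_up_matrix_alt matrix word
      = matrix.mapIdx (fun r row => pvRowOut word.toList (matrix.headD []).length r row) := by
  set cols := (matrix.headD []).length with hcols
  rw [show fill_up_matrix_alt matrix word
      = (List.range matrix.length).foldl
          (fun mat r =>
            mat.set r
              ((PySem.List.slice ((List.replicate (matrix.length * cols / max word.toList.length 1 + 1)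
                  word.toList).flatten)
                (some ((r * cols : Nat) : Int)) (some (((r + 1) * cols : Nat) : Int))).map
                  (fun ch => String.mk [ch])
                ++ (mat.getD r []).drop cols))
          matrix from rfl]
  rw [pvB_outer word cols matrix
      (fun r => (List.range cols).map (fun c => pvCell word.toList ((r * cols + c) % word.toList.length)))
      (fun r hr => pv_chunk_eq word.toList hL matrix.length cols r hr)
      matrix.length (le_refl _)]
  simp [pvRowOut]

-- the trivial B path: a matrix with zero columns is returned unchanged
lemma pvB_cols_zero (matrix : List (List String)) (word : String)
    (h : (matrix.headD []).length = 0) :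
    fill_up_matrix_alt matrix word = matrix := by
  set L := word.toList.length
  rw [show fill_up_matrix_alt matrix word
      = (List.range matrix.length).foldl
          (fun mat r =>
            mat.set r
              ((PySem.List.slice ((List.replicate (matrix.length * (matrix.headD []).length / max L 1 + 1)
                  word.toList).flatten)
                (some ((r * (matrix.headD []).length : Nat) : Int))
                (some (((r + 1) * (matrix.headD []).length : Nat) : Int))).map
                  (fun ch => String.mk [ch])
                ++ (mat.getD r []).drop (matrix.headD []).length))
          matrix from rfl]
  rw [h]
  have hstep : ∀ (mat : List (List String)) (r : Nat) (hr : r < mat.length),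
      mat.getD r [] = mat[r]'hr := by
    intro mat r hr
    rw [List.getD_eq_getElem?_getD, List.getElem?_eq_getElem hr]; rfl
  have : ∀ n, n ≤ matrix.length →
      (List.range n).foldl
        (fun mat r =>
          mat.set r
            ((PySem.List.slice ((List.replicate (matrix.length * 0 / max L 1 + 1) word.toList).flatten)
              (some ((r * 0 : Nat) : Int)) (some (((r + 1) * 0 : Nat) : Int))).map
                (fun ch => String.mk [ch])
              ++ (mat.getD r []).drop 0))
        matrix = matrix := by
    intro n
    induction n with
    | zero => simp
    | succ n ih =>
      intro hn
      rw [List.range_succ, List.foldl_append, ih (by omega), List.foldl_cons, List.foldl_nil]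
      have hn' : n < matrix.length := by omega
      rw [hstep matrix n hn', PySem.List.slice_natCast]
      simp [List.set_getElem_self]
  exact this matrix.length (le_refl _)

-- ===== VERDICT (by name: the statement is the Claim_ definition above) =====
theorem fill_up_matrix_spec : Claim_equal_fill_up_matrix := by
  intro matrix word _ hPre
  obtain ⟨hne, hrows, hdisj⟩ := hPre
  unfold Spec_fill_up_matrix
  by_cases hw : word.toList.length = 0
  · have hcols0 : (matrix.headD []).length = 0 := by
      rcases hdisj with h | h
      · exact h
      · exact absurd (List.length_eq_zero_iff.mp hw) h
    rw [pvA_cols_zero matrix word hcols0, pvB_cols_zero matrix word hcols0]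
  · rw [pvA_char matrix word hrows hw, pvB_char matrix word hw]
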